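-- pv_equiv track=rewrite | github.com/Odhiambo2001/Thematic-Analysis | Word1.py | analyze_themes
-- ===== SOURCE A (Python) =====
-- def analyze_themes(text):
--     """
--     Analyzes the themes or topics in the conversation transcript.
--
--     Args:
--     text (str): The preprocessed text data.
--
--     Returns:
--     list: A list of themes or topics identified in the conversation.
--     """
--     # Split the text into individual utterances
--     utterances = text.split('\n')
--
--     # Initialize a dictionary to store themes and their frequencies
--     themes = {}
--
--     # Iterate through each utterance
--     for utterance in utterances:
--         # Tokenize the utterance
--         words = utterance.split()
--
--         # Iterate through each word in the utterance
--         for word in words: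
--             # Check if the word is a theme
--             if len(word) > 3:  # Filter out short words
--                 # Increment the frequency count for the theme
--                 themes[word] = themes.get(word, 0) + 1
--
--     # Sort themes by frequency in descending order
--     sorted_themes = sorted(themes.items(), key=lambda x: x[1], reverse=True)
--
--     return sorted_themes
-- ===== SOURCE B (Python) =====
-- def analyze_themes(text):
--     # First pass: frequency dict of words longer than 3 chars (insertion order).
--     themes = {}
--     for utterance in text.split('\n'):
--         for word in utterance.split():
--             if len(word) > 3:
--                 themes[word] = themes.get(word, 0) + 1
--     # Bucket the (word, count) pairs by count, tracking the maximum count.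
--     buckets = {}
--     maxc = 0
--     for word, count in themes.items():
--         buckets[count] = buckets.get(count, []) + [(word, count)]
--         if count > maxc:
--             maxc = count
--     # Walk counts upward, prepending each bucket: highest counts end up first,
--     # insertion order preserved inside each bucket (= stable reverse sort).
--     result = []
--     for c in range(1, maxc + 1):
--         result = buckets.get(c, []) + result
--     return result
-- ===== Notes on version B (the rewrite author's own statement) =====
-- stated objective: alternative
-- what changed: The comparison sort (sorted with key=count, reverse=True) is replaced by a bucket/counting sort: pairs are grouped into per-count buckets in insertion order and the result is assembled by walking counts 1..max, prepending each bucket, which reproduces the stable descending order without comparisons.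
import Mathlib
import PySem

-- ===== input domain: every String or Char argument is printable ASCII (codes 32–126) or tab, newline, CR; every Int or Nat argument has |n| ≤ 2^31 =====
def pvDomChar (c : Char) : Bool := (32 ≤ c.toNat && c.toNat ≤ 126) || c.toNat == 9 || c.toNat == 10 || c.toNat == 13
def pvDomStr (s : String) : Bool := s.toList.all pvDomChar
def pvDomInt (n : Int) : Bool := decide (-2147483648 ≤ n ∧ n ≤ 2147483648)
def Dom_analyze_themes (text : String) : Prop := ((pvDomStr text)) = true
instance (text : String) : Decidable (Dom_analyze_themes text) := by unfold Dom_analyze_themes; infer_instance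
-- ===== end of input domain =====

-- B replaces A's comparison sort (key=count, reverse=True) by a bucket/counting sort over per-count
-- buckets assembled from count 1 upward by prepending; an alternative of similar cost, not claimed faster.

-- ===== PORT A =====
-- text.split('\n'): sep is the literal "\n" ≠ "", so split? is always `some`; getD [] only unwraps it
def analyze_themes (text : String) : List (String × Int) :=
  let utterances := (PySem.Str.split? text "\n").getD []
  let themes := utterances.foldl (fun d utterance =>
      (PySem.Str.split₀ utterance).foldl (fun d word =>
        if 3 < PySem.Str.len word then d.insert word (d.getD word 0 + 1) else d) d)
    PySem.Dict.empty
  PySem.List.sorted themes.items (fun x => x.2) true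

-- ===== PORT B =====
def analyze_themes_alt (text : String) : List (String × Int) :=
  let themes := ((PySem.Str.split? text "\n").getD []).foldl (fun d utterance =>
      (PySem.Str.split₀ utterance).foldl (fun d word =>
        if 3 < PySem.Str.len word then d.insert word (d.getD word 0 + 1) else d) d)
    PySem.Dict.empty
  let s := themes.items.foldl (fun s p =>
      (s.1.modify p.2 ([] : List (String × Int)) (· ++ [p]),
       if s.2 < p.2 then p.2 else s.2))
    ((PySem.Dict.empty : PySem.Dict Int (List (String × Int))), (0 : Int))
  (PySem.List.pyRange 1 (s.2 + 1) 1).foldl (fun result c => s.1.getD c [] ++ result) []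

-- ===== PRECONDITION & SPEC =====
def Spec_analyze_themes (text : String) (out : List (String × Int)) : Prop := out = analyze_themes_alt text
instance (text : String) (out : List (String × Int)) : Decidable (Spec_analyze_themes text out) := by unfold Spec_analyze_themes; infer_instance

-- ===== CLAIM (what is proved, stated in full; the proofs are below) =====
def Claim_equal_analyze_themes : Prop := ∀ (text : String), Dom_analyze_themes text → Spec_analyze_themes text (analyze_themes text)

-- ===== LEMMAS AND PROOFS =====

-- [n, n-1, ..., 1] as Ints (proof-only helper)
def descFrom : Nat → List Int
  | 0 => []
  | n+1 => ((n+1 : Nat) : Int) :: descFrom n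

theorem mem_descFrom {x : Int} : ∀ {n : Nat}, x ∈ descFrom n ↔ 1 ≤ x ∧ x ≤ (n : Int) := by
  intro n
  induction n with
  | zero => simp [descFrom]; omega
  | succ n ih => simp [descFrom, ih]; omega

theorem fm_congr {α β : Type} {l : List α} {f g : α → List β}
    (h : ∀ a ∈ l, f a = g a) : l.flatMap f = l.flatMap g := by
  induction l with
  | nil => rfl
  | cons a l ih =>
    simp only [List.flatMap_cons]
    rw [h a (by simp), ih (fun a ha => h a (by simp [ha]))]

theorem descFrom_split : ∀ (n c : Nat), 1 ≤ c → c ≤ n →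
    ∃ A, descFrom n = A ++ (c : Int) :: descFrom (c - 1) ∧ ∀ y ∈ A, (c : Int) < y := by
  intro n
  induction n with
  | zero => intro c hc h; omega
  | succ n ih =>
    intro c hc h
    by_cases hcn : c = n + 1
    · subst hcn
      exact ⟨[], by simp [descFrom], by simp⟩
    · obtain ⟨A, hA, hAy⟩ := ih c hc (by omega)
      refine ⟨((n+1 : Nat) : Int) :: A, by simp [descFrom, hA], ?_⟩
      intro y hy
      rcases List.mem_cons.1 hy with rfl | hy
      · push_cast; omega
      · exact hAy y hy

theorem insertBy_between {α : Type} (before : α → α → Bool) (x : α) :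
    ∀ (u v : List α), (∀ y ∈ u, before x y = false) → (∀ y ∈ v, before x y = true) →
      PySem.List.insertBy before x (u ++ v) = u ++ x :: v := by
  intro u
  induction u with
  | nil =>
    intro v _ hv
    cases v with
    | nil => simp [PySem.List.insertBy]
    | cons z vs =>
      have hz := hv z (by simp)
      simp [PySem.List.insertBy, hz]
  | cons y u' ih =>
    intro v hu hv
    have hy := hu y (by simp)
    simp only [List.cons_append, PySem.List.insertBy, hy]
    simp only [Bool.false_eq_true, if_false, List.cons.injEq, true_and]
    exact ih v (fun y hy' => hu y (by simp [hy'])) hv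

-- the stable descending sort on bounded positive integer keys IS the bucket concatenation
theorem sorted_rev_eq_buckets (n : Nat) : ∀ (l : List (String × Int)),
    (∀ p ∈ l, 1 ≤ p.2 ∧ p.2 ≤ (n : Int)) →
    PySem.List.sorted l (fun p => p.2) true
      = (descFrom n).flatMap (fun c => l.filter (fun p => p.2 == c)) := by
  intro l
  induction l using List.reverseRecOn with
  | nil => intro _; simp [PySem.List.sorted]
  | append_singleton l x ih =>
    intro h
    have hx := h x (by simp)
    have hl : ∀ p ∈ l, 1 ≤ p.2 ∧ p.2 ≤ (n : Int) := fun p hp => h p (by simp [hp])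
    rw [PySem.List.sorted_rev_eq_foldl_insertBy, List.foldl_append, List.foldl_cons,
        List.foldl_nil, ← PySem.List.sorted_rev_eq_foldl_insertBy, ih hl]
    obtain ⟨A, hA, hAy⟩ := descFrom_split n x.2.toNat (by omega) (by omega)
    have hxc : ((x.2.toNat : Nat) : Int) = x.2 := Int.toNat_of_nonneg (by omega)
    rw [hA]
    simp only [List.flatMap_append, List.flatMap_cons, hxc]
    -- RHS buckets over l ++ [x]
    have hfilt : ∀ c : Int, (l ++ [x]).filter (fun p => p.2 == c)
        = l.filter (fun p => p.2 == c) ++ if x.2 == c then [x] else [] := by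
      intro c; simp [List.filter_append, List.filter_singleton]
    have hAfl : A.flatMap (fun c => (l ++ [x]).filter (fun p => p.2 == c))
        = A.flatMap (fun c => l.filter (fun p => p.2 == c)) := by
      apply fm_congr
      intro c hc
      have hgt := hAy c hc
      rw [hfilt c, if_neg (by simp; omega), List.append_nil]
    have hDfl : (descFrom (x.2.toNat - 1)).flatMap (fun c => (l ++ [x]).filter (fun p => p.2 == c))
        = (descFrom (x.2.toNat - 1)).flatMap (fun c => l.filter (fun p => p.2 == c)) := by
      apply fm_congr
      intro c hc
      have hcm := mem_descFrom.1 hc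
      rw [hfilt c, if_neg (by simp; omega), List.append_nil]
    have hCfl : (l ++ [x]).filter (fun p => p.2 == x.2)
        = l.filter (fun p => p.2 == x.2) ++ [x] := by
      rw [hfilt x.2, if_pos (by simp)]
    rw [hAfl, hDfl, hCfl]
    -- LHS: insert x after all keys ≥ x.2, before all keys < x.2
    have := insertBy_between (fun a b : String × Int => decide (b.2 < a.2)) x
      (A.flatMap (fun c => l.filter (fun p => p.2 == c)) ++ l.filter (fun p => p.2 == x.2))
      ((descFrom (x.2.toNat - 1)).flatMap (fun c => l.filter (fun p => p.2 == c)))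
      (by
        intro y hy
        rcases List.mem_append.1 hy with hy | hy
        · obtain ⟨c, hcA, hyc⟩ := List.mem_flatMap.1 hy
          have : y.2 = c := by simpa using (List.mem_filter.1 hyc).2
          have := hAy c hcA
          simp; omega
        · have : y.2 = x.2 := by simpa using (List.mem_filter.1 hy).2
          simp; omega)
      (by
        intro y hy
        obtain ⟨c, hcD, hyc⟩ := List.mem_flatMap.1 hy
        have hyc2 : y.2 = c := by simpa using (List.mem_filter.1 hyc).2
        have := mem_descFrom.1 hcD
        simp; omega)
    rw [List.append_assoc] at this
    rw [this]
    simp [List.append_assoc]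

-- every count produced by the counting fold is positive: inner word loop …
theorem inner_pos : ∀ (ws : List String) (d : PySem.Dict String Int),
    (∀ p ∈ d.items, (1 : Int) ≤ p.2) →
    ∀ p ∈ (ws.foldl (fun d word =>
        if 3 < PySem.Str.len word then d.insert word (d.getD word 0 + 1) else d) d).items,
      (1 : Int) ≤ p.2 := by
  intro ws
  induction ws with
  | nil => intro d hd; simpa using hd
  | cons w ws ih =>
    intro d hd
    simp only [List.foldl_cons]
    apply ih
    split_ifs with hw
    · intro p hp
      rcases (PySem.Dict.mem_items_insert d w (d.getD w 0 + 1) p).1 hp with rfl | ⟨hp', _⟩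
      · rw [PySem.Dict.getD_eq_get?_getD]
        cases hget : d.get? w with
        | none => simp
        | some v =>
          have := hd (w, v) (PySem.Dict.mem_items_of_get?_eq_some d hget)
          simp at this ⊢; omega
      · exact hd p hp'
    · exact hd

-- … and the outer utterance loop
theorem counts_pos (text : String) :
    ∀ p ∈ ((((PySem.Str.split? text "\n").getD []).foldl (fun d utterance =>
      (PySem.Str.split₀ utterance).foldl (fun d word =>
        if 3 < PySem.Str.len word then d.insert word (d.getD word 0 + 1) else d) d)
      PySem.Dict.empty).items), (1 : Int) ≤ p.2 := by
  have outer : ∀ (us : List String) (d : PySem.Dict String Int),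
      (∀ p ∈ d.items, (1 : Int) ≤ p.2) →
      ∀ p ∈ (us.foldl (fun d utterance =>
        (PySem.Str.split₀ utterance).foldl (fun d word =>
          if 3 < PySem.Str.len word then d.insert word (d.getD word 0 + 1) else d) d) d).items,
        (1 : Int) ≤ p.2 := by
    intro us
    induction us with
    | nil => intro d hd; simpa using hd
    | cons u us ih =>
      intro d hd
      simp only [List.foldl_cons]
      exact ih _ (inner_pos _ d hd)
  exact outer _ PySem.Dict.empty (by simp [PySem.Dict.empty])

theorem foldl_max_mono : ∀ (l : List (String × Int)) (m : Int),
    m ≤ l.foldl (fun m p => if m < p.2 then p.2 else m) m := by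
  intro l
  induction l with
  | nil => simp
  | cons q l ih =>
    intro m
    simp only [List.foldl_cons]
    refine le_trans ?_ (ih _)
    split_ifs <;> omega

theorem foldl_max_bound : ∀ (l : List (String × Int)) (m : Int) (p : String × Int), p ∈ l →
    p.2 ≤ l.foldl (fun m p => if m < p.2 then p.2 else m) m := by
  intro l
  induction l with
  | nil => simp
  | cons q l ih =>
    intro m p hp
    simp only [List.foldl_cons]
    rcases List.mem_cons.1 hp with rfl | hp
    · refine le_trans ?_ (foldl_max_mono l _)
      split_ifs <;> omega
    · exact ih _ p hp

theorem foldl_prepend {α β : Type} (g : α → List β) :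
    ∀ (l : List α) (a : List β),
      l.foldl (fun acc c => g c ++ acc) a = l.reverse.flatMap g ++ a := by
  intro l
  induction l with
  | nil => simp
  | cons c l ih =>
    intro a
    simp only [List.foldl_cons, List.reverse_cons, List.flatMap_append, ih]
    simp [List.append_assoc]

theorem range_map_reverse : ∀ (n : Nat),
    ((List.range n).map (fun k : Nat => (1 : Int) + (k : Int))).reverse = descFrom n := by
  intro n
  induction n with
  | zero => simp [descFrom]
  | succ n ih =>
    rw [List.range_succ, List.map_append, List.reverse_append, ih]
    simp only [List.map_cons, List.map_nil, List.reverse_cons, List.reverse_nil, List.nil_append,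
      List.singleton_append, descFrom, List.cons.injEq]
    exact ⟨by push_cast; ring, trivial⟩

theorem bucket_getD (l : List (String × Int)) (c : Int) :
    (l.foldl (fun d p => d.modify p.2 ([] : List (String × Int)) (· ++ [p]))
      (PySem.Dict.empty : PySem.Dict Int (List (String × Int)))).getD c []
      = l.filter (fun p => p.2 == c) := by
  have hmap : l.foldl (fun d p => d.modify p.2 ([] : List (String × Int)) (· ++ [p]))
        (PySem.Dict.empty : PySem.Dict Int (List (String × Int)))
      = (l.map (fun p => (p.2, p))).foldl
          (fun d q => d.modify q.1 ([] : List (String × Int)) (· ++ [q.2]))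
          (PySem.Dict.empty : PySem.Dict Int (List (String × Int))) := by
    rw [List.foldl_map]
  rw [hmap, PySem.Dict.getD_foldl_modify_append]
  simp [List.filter_map, List.map_map, Function.comp_def]

-- bucket assembly = stable reverse sort, for any item list with positive counts
theorem combine (items : List (String × Int)) (h1 : ∀ p ∈ items, (1 : Int) ≤ p.2) :
    PySem.List.sorted items (fun x => x.2) true
      = (PySem.List.pyRange 1
          ((items.foldl (fun m p => if m < p.2 then p.2 else m) 0) + 1) 1).foldl
          (fun result c =>
            (items.foldl (fun d p => d.modify p.2 ([] : List (String × Int)) (· ++ [p]))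
              (PySem.Dict.empty : PySem.Dict Int (List (String × Int)))).getD c [] ++ result) [] := by
  set maxc := items.foldl (fun m p => if m < p.2 then p.2 else m) 0 with hmaxc
  have h0 : (0 : Int) ≤ maxc := foldl_max_mono items 0
  rw [foldl_prepend, PySem.List.pyRange_one]
  have hsub : (maxc + 1 - 1 : Int) = maxc := by ring
  rw [hsub, range_map_reverse maxc.toNat]
  rw [fm_congr (fun c _ => bucket_getD items c), List.append_nil]
  exact sorted_rev_eq_buckets maxc.toNat items (fun p hp =>
    ⟨h1 p hp, by rw [Int.toNat_of_nonneg h0]; exact foldl_max_bound items 0 p hp⟩)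

-- ===== VERDICT (by name: the statement is the Claim_ definition above) =====
theorem analyze_themes_spec : Claim_equal_analyze_themes := by
  intro text _
  unfold Spec_analyze_themes analyze_themes analyze_themes_alt
  simp only [PySem.List.foldl_prod_mk
    (f := fun (d : PySem.Dict Int (List (String × Int))) (p : String × Int) =>
      d.modify p.2 ([] : List (String × Int)) (· ++ [p]))
    (g := fun (m : Int) (p : String × Int) => if m < p.2 then p.2 else m)]
  exact combine _ (counts_pos text)
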